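-- pv_equiv track=rewrite | github.com/kwaskowy/pp1 | 09-Test2/p1.py | f
-- ===== SOURCE A (Python) =====
-- def f(player1,player2):
--     wynik= 0
--     for x in player1:
--         if x=="A" or x=="K" or x=="Q" or x=="J" or x=="T":
--             wynik+=10
--         elif x=="9" or x=="8" or x=="7" or x=="6" or x=="5" or x=="4" or x=="3" or x=="2" or x=="1":
--             wynik+=int(x)
--     for x in player2:
--         if x=="A" or x=="K" or x=="Q" or x=="J" or x=="T":
--             wynik-=10
--         elif x=="9" or x=="8" or x=="7" or x=="6" or x=="5" or x=="4" or x=="3" or x=="2" or x=="1":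
--             wynik-=int(x)
--     if wynik>0:
--         return True
--     else: return False
-- ===== SOURCE B (Python) =====
-- RANKS = [("A", 10), ("K", 10), ("Q", 10), ("J", 10), ("T", 10),
--          ("9", 9), ("8", 8), ("7", 7), ("6", 6), ("5", 5),
--          ("4", 4), ("3", 3), ("2", 2), ("1", 1)]
--
-- def f(player1, player2):
--     # Rank-oriented: for each scoring rank, count its occurrences in both
--     # hands and weight the count difference by the rank's value.
--     diff = 0
--     for r, v in RANKS:
--         diff += v * (player1.count(r) - player2.count(r))
--     return diff > 0
-- ===== Notes on version B (the rewrite author's own statement) =====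
-- stated objective: alternative
-- what changed: Inverts the traversal: instead of one pass over the cards with a per-card if/elif cascade and one running accumulator, B loops over the 14 scoring ranks, counts each rank's occurrences in both hands with list.count, and sums value-weighted count differences (a histogram formulation).
import Mathlib
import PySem

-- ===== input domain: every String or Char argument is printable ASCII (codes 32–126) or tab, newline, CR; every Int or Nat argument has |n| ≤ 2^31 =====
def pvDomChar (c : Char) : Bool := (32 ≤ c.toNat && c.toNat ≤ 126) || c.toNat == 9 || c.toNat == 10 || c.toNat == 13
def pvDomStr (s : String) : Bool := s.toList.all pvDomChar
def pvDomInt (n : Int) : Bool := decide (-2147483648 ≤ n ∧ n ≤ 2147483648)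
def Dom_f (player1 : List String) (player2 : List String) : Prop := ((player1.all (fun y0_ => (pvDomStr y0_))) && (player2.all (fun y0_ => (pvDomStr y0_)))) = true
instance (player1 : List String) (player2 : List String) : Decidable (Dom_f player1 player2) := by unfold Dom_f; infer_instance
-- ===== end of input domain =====

-- B inverts the traversal: a loop over the 14 scoring ranks counting occurrences in each hand
-- (histogram formulation), instead of A's per-card if/elif cascade with one running accumulator.

-- ===== PORT A =====
-- loop body of A's first loop: add the card's value to the running score
-- (int(x) ported as (PySem.Int.ofStr? x).getD 0; the branch guarantees x is "1".."9", where ofStr? is some)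
def fStepAdd (w : Int) (x : String) : Int :=
  if x == "A" || x == "K" || x == "Q" || x == "J" || x == "T" then w + 10
  else if x == "9" || x == "8" || x == "7" || x == "6" || x == "5" || x == "4" || x == "3" || x == "2" || x == "1" then
    w + (PySem.Int.ofStr? x).getD 0
  else w

-- loop body of A's second loop: subtract
def fStepSub (w : Int) (x : String) : Int :=
  if x == "A" || x == "K" || x == "Q" || x == "J" || x == "T" then w - 10
  else if x == "9" || x == "8" || x == "7" || x == "6" || x == "5" || x == "4" || x == "3" || x == "2" || x == "1" then
    w - (PySem.Int.ofStr? x).getD 0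
  else w

def f (player1 : List String) (player2 : List String) : Bool :=
  let wynik : Int := 0
  let wynik := player1.foldl fStepAdd wynik
  let wynik := player2.foldl fStepSub wynik
  if wynik > 0 then true else false

-- ===== PORT B =====
def RANKS : List (String × Int) :=
  [("A", 10), ("K", 10), ("Q", 10), ("J", 10), ("T", 10),
   ("9", 9), ("8", 8), ("7", 7), ("6", 6), ("5", 5),
   ("4", 4), ("3", 3), ("2", 2), ("1", 1)]

def f_alt (player1 : List String) (player2 : List String) : Bool :=
  let diff : Int := RANKS.foldl
    (fun diff rv =>
      diff + rv.2 * ((PySem.List.count player1 rv.1 : Int) - (PySem.List.count player2 rv.1 : Int))) 0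
  decide (diff > 0)

-- ===== PRECONDITION & SPEC =====
def Spec_f (player1 : List String) (player2 : List String) (out : Bool) : Prop := out = f_alt player1 player2
instance (player1 : List String) (player2 : List String) (out : Bool) : Decidable (Spec_f player1 player2 out) := by unfold Spec_f; infer_instance

-- ===== CLAIM (what is proved, stated in full; the proofs are below) =====
def Claim_equal_f : Prop := ∀ (player1 : List String) (player2 : List String), Dom_f player1 player2 → Spec_f player1 player2 (f player1 player2)

-- ===== LEMMAS AND PROOFS =====

theorem fStepAdd_shift (w : Int) (x : String) : fStepAdd w x = w + fStepAdd 0 x := by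
  unfold fStepAdd; split_ifs <;> ring

theorem fStepSub_eq (w : Int) (x : String) : fStepSub w x = w - fStepAdd 0 x := by
  unfold fStepSub fStepAdd; split_ifs <;> ring

-- the value A adds for one card, written as a sum of rank indicators
theorem fStepAdd_indicator (x : String) :
    fStepAdd 0 x =
      10 * (if x == "A" then (1:Int) else 0) + 10 * (if x == "K" then (1:Int) else 0)
    + 10 * (if x == "Q" then (1:Int) else 0) + 10 * (if x == "J" then (1:Int) else 0)
    + 10 * (if x == "T" then (1:Int) else 0) + 9 * (if x == "9" then (1:Int) else 0)
    + 8 * (if x == "8" then (1:Int) else 0) + 7 * (if x == "7" then (1:Int) else 0)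
    + 6 * (if x == "6" then (1:Int) else 0) + 5 * (if x == "5" then (1:Int) else 0)
    + 4 * (if x == "4" then (1:Int) else 0) + 3 * (if x == "3" then (1:Int) else 0)
    + 2 * (if x == "2" then (1:Int) else 0) + 1 * (if x == "1" then (1:Int) else 0) := by
  rcases eq_or_ne x "A" with rfl | hA
  · rfl
  rcases eq_or_ne x "K" with rfl | hK
  · rfl
  rcases eq_or_ne x "Q" with rfl | hQ
  · rfl
  rcases eq_or_ne x "J" with rfl | hJ
  · rfl
  rcases eq_or_ne x "T" with rfl | hT
  · rfl
  rcases eq_or_ne x "9" with rfl | h9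
  · rfl
  rcases eq_or_ne x "8" with rfl | h8
  · rfl
  rcases eq_or_ne x "7" with rfl | h7
  · rfl
  rcases eq_or_ne x "6" with rfl | h6
  · rfl
  rcases eq_or_ne x "5" with rfl | h5
  · rfl
  rcases eq_or_ne x "4" with rfl | h4
  · rfl
  rcases eq_or_ne x "3" with rfl | h3
  · rfl
  rcases eq_or_ne x "2" with rfl | h2
  · rfl
  rcases eq_or_ne x "1" with rfl | h1
  · rfl
  unfold fStepAdd
  simp [beq_iff_eq, hA, hK, hQ, hJ, hT, h9, h8, h7, h6, h5, h4, h3, h2, h1]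

theorem foldl_add_shift (l : List String) (w : Int) :
    l.foldl fStepAdd w = w + l.foldl fStepAdd 0 := by
  induction l generalizing w with
  | nil => simp
  | cons x xs ih =>
      simp only [List.foldl_cons]
      rw [ih, ih (fStepAdd 0 x), fStepAdd_shift]
      ring

theorem foldl_sub_shift (l : List String) (w : Int) :
    l.foldl fStepSub w = w - l.foldl fStepAdd 0 := by
  induction l generalizing w with
  | nil => simp
  | cons x xs ih =>
      simp only [List.foldl_cons]
      rw [ih, foldl_add_shift xs (fStepAdd 0 x), fStepSub_eq]
      ring

-- A's score of one hand, characterised as a value-weighted histogram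
theorem scoreA_eq_counts (p : List String) :
    p.foldl fStepAdd 0 =
      10 * (p.count "A" : Int) + 10 * (p.count "K" : Int) + 10 * (p.count "Q" : Int)
    + 10 * (p.count "J" : Int) + 10 * (p.count "T" : Int) + 9 * (p.count "9" : Int)
    + 8 * (p.count "8" : Int) + 7 * (p.count "7" : Int) + 6 * (p.count "6" : Int)
    + 5 * (p.count "5" : Int) + 4 * (p.count "4" : Int) + 3 * (p.count "3" : Int)
    + 2 * (p.count "2" : Int) + 1 * (p.count "1" : Int) := by
  induction p with
  | nil => simp
  | cons x xs ih =>
      simp only [List.foldl_cons]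
      rw [foldl_add_shift, ih]
      simp only [List.count_cons]
      push_cast
      rw [fStepAdd_indicator]
      ring

-- ===== VERDICT (by name: the statement is the Claim_ definition above) =====
theorem f_spec : Claim_equal_f := by
  intro p1 p2 _
  unfold Spec_f f f_alt
  dsimp only
  rw [foldl_sub_shift]
  simp only [RANKS, List.foldl_cons, List.foldl_nil, PySem.List.count_eq]
  rw [scoreA_eq_counts p1, scoreA_eq_counts p2]
  split_ifs with h
  · exact (decide_eq_true (by linarith)).symm
  · exact (decide_eq_false (fun hc => h (by linarith))).symm
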